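-- pv_equiv track=rewrite | github.com/songjinghe/research-units-pipeline-skills | tooling/review_workflows.py | parse_item_blocks
-- ===== SOURCE A (Python) =====
-- def parse_item_blocks(text: str) -> list[dict[str, str]]:
--     records: list[dict[str, str]] = []
--     current: dict[str, str] | None = None
--     for raw in (text or "").splitlines():
--         line = raw.rstrip()
--         if line.startswith("### "):
--             if current:
--                 records.append(current)
--             current = {"id": line[4:].strip()}
--             continue
--         if not current or not line.lstrip().startswith("- ") or ":" not in line:
--             continue
--         payload = line.lstrip()[2:]
--         key, value = payload.split(":", 1)
--         current[key.strip().lower().replace(" ", "_").replace("/", "_")] = value.strip()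
--     if current:
--         records.append(current)
--     return records
-- ===== SOURCE B (Python) =====
-- def _blocks(lines):
--     # recursively partition rstripped lines into (header-id, body-lines) blocks
--     if not lines:
--         return []
--     first, rest = lines[0], lines[1:]
--     if not first.startswith("### "):
--         return _blocks(rest)
--     k = 0
--     while k < len(rest) and not rest[k].startswith("### "):
--         k += 1
--     return [(first[4:].strip(), rest[:k])] + _blocks(rest[k:])
--
--
-- def _record(header, body):
--     rec = {"id": header}
--     for line in body:
--         s = line.lstrip()
--         if s.startswith("- ") and ":" in s:
--             key, value = s[2:].split(":", 1)
--             rec[key.strip().lower().replace(" ", "_").replace("/", "_")] = value.strip()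
--     return rec
--
--
-- def parse_item_blocks(text: str) -> list[dict[str, str]]:
--     lines = [raw.rstrip() for raw in (text or "").splitlines()]
--     return [_record(h, body) for h, body in _blocks(lines)]
-- ===== Notes on version B (the rewrite author's own statement) =====
-- stated objective: alternative
-- what changed: A's single interleaved state-machine loop (records + mutable current dict) is replaced by a two-phase group-then-map structure: first partition the rstripped lines into (header, body-lines) blocks via a recursive splitter, then map each block independently to its record dict.
import Mathlib
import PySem

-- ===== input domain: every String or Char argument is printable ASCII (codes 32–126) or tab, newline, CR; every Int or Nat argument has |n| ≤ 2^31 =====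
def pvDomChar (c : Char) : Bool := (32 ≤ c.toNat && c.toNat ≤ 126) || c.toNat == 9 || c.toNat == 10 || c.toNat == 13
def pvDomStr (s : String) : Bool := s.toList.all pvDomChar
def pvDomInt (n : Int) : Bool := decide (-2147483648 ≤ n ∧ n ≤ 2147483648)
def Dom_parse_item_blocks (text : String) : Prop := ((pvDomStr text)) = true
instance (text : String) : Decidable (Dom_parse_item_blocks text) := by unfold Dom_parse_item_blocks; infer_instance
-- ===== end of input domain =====

-- B replaces A's single interleaved state-machine loop by a two-phase decomposition
-- (partition the rstripped lines into header+body blocks, then map each block to a record);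
-- objective: alternative structure, same cost.

-- ===== PORT A =====
-- key.strip().lower().replace(" ", "_").replace("/", "_")
def pvANorm (k : String) : String :=
  PySem.Str.replace (PySem.Str.replace (PySem.Str.lower (PySem.Str.strip k)) " " "_") "/" "_"

-- 'if current: records.append(current)'  (truthiness: None and the empty dict are falsy)
def pvAFlush (recs : List (PySem.Dict String String)) :
    Option (PySem.Dict String String) → List (PySem.Dict String String)
  | none => recs
  | some cur => if cur.items.isEmpty then recs else recs ++ [cur]

-- one iteration of A's loop, state = (records, current); line := raw.rstrip() written out at each use
def pvAStep (st : List (PySem.Dict String String) × Option (PySem.Dict String String))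
    (raw : String) : List (PySem.Dict String String) × Option (PySem.Dict String String) :=
  if PySem.Str.startswith (PySem.Str.rstrip raw) "### " then
    (pvAFlush st.1 st.2,
     some (PySem.Dict.insert PySem.Dict.empty "id"
       (PySem.Str.strip (PySem.Str.slice (PySem.Str.rstrip raw) (some 4) none))))
  else
    match st.2 with
    | none => st
    | some cur =>
      if cur.items.isEmpty then st            -- 'if not current: continue'
      else if PySem.Str.startswith (PySem.Str.lstrip (PySem.Str.rstrip raw)) "- " = false then st
      else if PySem.Str.isIn ":" (PySem.Str.rstrip raw) = false then st
      else
        match PySem.Str.splitMax?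
            (PySem.Str.slice (PySem.Str.lstrip (PySem.Str.rstrip raw)) (some 2) none) ":" 1 with
        | some [k, v] => (st.1, some (cur.insert (pvANorm k) (PySem.Str.strip v)))
        | _ => st                             -- unreachable: ':' occurs in the payload, split gives two parts

def parse_item_blocks (text : String) : List (List (String × String)) :=
  let st := (PySem.Str.splitlines (if text = "" then "" else text)).foldl pvAStep ([], none)
  (pvAFlush st.1 st.2).map PySem.Dict.items

-- ===== PORT B =====
def pvBNorm (k : String) : String :=
  PySem.Str.replace (PySem.Str.replace (PySem.Str.lower (PySem.Str.strip k)) " " "_") "/" "_"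

def pvBHeader (l : String) : Bool := PySem.Str.startswith l "### "

-- _blocks: the while-scan computes k = index of the first header in rest, then slices
-- rest[:k] / rest[k:] — ported exactly as takeWhile / dropWhile of the non-header test
def pvBBlocks : List String → List (String × List String)
  | [] => []
  | first :: rest =>
    if pvBHeader first then
      (PySem.Str.strip (PySem.Str.slice first (some 4) none),
       rest.takeWhile (fun l => !pvBHeader l)) :: pvBBlocks (rest.dropWhile (fun l => !pvBHeader l))
    else pvBBlocks rest
termination_by lines => lines.length
decreasing_by
  · exact Nat.lt_succ_of_le (List.length_dropWhile_le _ _)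
  · exact Nat.lt_succ_self _

-- one body line of _record; s := line.lstrip() written out at each use
def pvBField (rec : PySem.Dict String String) (line : String) : PySem.Dict String String :=
  if PySem.Str.startswith (PySem.Str.lstrip line) "- "
      && PySem.Str.isIn ":" (PySem.Str.lstrip line) then
    match PySem.Str.splitMax? (PySem.Str.slice (PySem.Str.lstrip line) (some 2) none) ":" 1 with
    | some [k, v] => rec.insert (pvBNorm k) (PySem.Str.strip v)
    | _ => rec
  else rec

def pvBRecord (h : String) (body : List String) : PySem.Dict String String :=
  body.foldl pvBField (PySem.Dict.insert PySem.Dict.empty "id" h)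

def parse_item_blocks_alt (text : String) : List (List (String × String)) :=
  let lines := (PySem.Str.splitlines (if text = "" then "" else text)).map PySem.Str.rstrip
  (pvBBlocks lines).map (fun b => (pvBRecord b.1 b.2).items)

-- ===== PRECONDITION & SPEC =====
def Spec_parse_item_blocks (text : String) (out : List (List (String × String))) : Prop := out = parse_item_blocks_alt text
instance (text : String) (out : List (List (String × String))) : Decidable (Spec_parse_item_blocks text out) := by unfold Spec_parse_item_blocks; infer_instance

-- ===== CLAIM (what is proved, stated in full; the proofs are below) =====
def Claim_equal_parse_item_blocks : Prop := ∀ (text : String), Dom_parse_item_blocks text → Spec_parse_item_blocks text (parse_item_blocks text)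

-- ===== LEMMAS AND PROOFS =====

-- ':' is a member of l iff of its lstrip (whitespace contains no ':')
theorem pv_colon_lstrip (l : List Char) :
    PySem.Chars.isIn [':'] (PySem.Chars.lstrip l) = PySem.Chars.isIn [':'] l := by
  rw [Bool.eq_iff_iff, PySem.Chars.isIn_iff_infix, PySem.Chars.isIn_iff_infix]
  have hsing : ∀ (m : List Char), [':'] <:+: m ↔ ':' ∈ m := by
    intro m
    constructor
    · intro h; exact (List.singleton_sublist).mp h.sublist
    · intro h
      obtain ⟨s, t, rfl⟩ := List.append_of_mem h
      exact ⟨s, t, by simp⟩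
  rw [hsing, hsing]
  show ':' ∈ l.dropWhile (fun c => PySem.Chars.isspace c) ↔ ':' ∈ l
  constructor
  · intro h; exact (List.dropWhile_sublist _).mem h
  · intro h
    rw [← List.takeWhile_append_dropWhile
          (p := fun c => PySem.Chars.isspace c) (l := l), List.mem_append] at h
    rcases h with h | h
    · have := List.mem_takeWhile_imp h
      simp at this
      exact absurd this (by decide)
    · exact h

theorem pv_colon_lstrip_str (line : String) :
    PySem.Str.isIn ":" (PySem.Str.lstrip line) = PySem.Str.isIn ":" line := by
  rw [PySem.Str.isIn_eq, PySem.Str.isIn_eq, PySem.Str.toList_lstrip]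
  exact pv_colon_lstrip line.toList

-- a dict after an insert is never empty
theorem pv_insert_nonempty (d : PySem.Dict String String) (k v : String) :
    (d.insert k v).items.isEmpty = false := by
  cases h : (d.insert k v).items with
  | cons a t => simp
  | nil =>
    exfalso
    have he : d.insert k v = PySem.Dict.mk [] := PySem.Dict.ext h
    have h1 : (d.insert k v).get? k = some v := by simp
    rw [he] at h1
    simp [PySem.Dict.get?] at h1

-- pvBField preserves nonemptiness
theorem pv_field_nonempty (rec : PySem.Dict String String) (line : String)
    (h : rec.items.isEmpty = false) : (pvBField rec line).items.isEmpty = false := by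
  unfold pvBField
  split
  · split
    · exact pv_insert_nonempty _ _ _
    · exact h
  · exact h

theorem pvAFlush_some (recs : List (PySem.Dict String String))
    (cur : PySem.Dict String String) (h : cur.items.isEmpty = false) :
    pvAFlush recs (some cur) = recs ++ [cur] := by
  show (if cur.items.isEmpty = true then recs else recs ++ [cur]) = _
  rw [h, if_neg (by decide : ¬ (false = true))]

-- computation lemmas for pvAStep (proved by rw, avoiding whnf of the string primitives)
theorem pvAStep_header (recs : List (PySem.Dict String String))
    (cur? : Option (PySem.Dict String String)) (raw : String)
    (hh : PySem.Str.startswith (PySem.Str.rstrip raw) "### " = true) :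
    pvAStep (recs, cur?) raw =
      (pvAFlush recs cur?,
       some (PySem.Dict.insert PySem.Dict.empty "id"
         (PySem.Str.strip (PySem.Str.slice (PySem.Str.rstrip raw) (some 4) none)))) := by
  unfold pvAStep
  rw [hh, if_pos rfl]

theorem pvAStep_none (recs : List (PySem.Dict String String)) (raw : String)
    (hnh : PySem.Str.startswith (PySem.Str.rstrip raw) "### " = false) :
    pvAStep (recs, none) raw = (recs, none) := by
  unfold pvAStep
  rw [hnh, if_neg (by decide : ¬ (false = true))]

theorem pvAStep_some (recs : List (PySem.Dict String String))
    (cur : PySem.Dict String String) (raw : String)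
    (hnh : PySem.Str.startswith (PySem.Str.rstrip raw) "### " = false) :
    pvAStep (recs, some cur) raw =
      (if cur.items.isEmpty then (recs, some cur)
       else if PySem.Str.startswith (PySem.Str.lstrip (PySem.Str.rstrip raw)) "- " = false then (recs, some cur)
       else if PySem.Str.isIn ":" (PySem.Str.rstrip raw) = false then (recs, some cur)
       else
         match PySem.Str.splitMax?
             (PySem.Str.slice (PySem.Str.lstrip (PySem.Str.rstrip raw)) (some 2) none) ":" 1 with
         | some [k, v] => (recs, some (cur.insert (pvANorm k) (PySem.Str.strip v)))
         | _ => (recs, some cur)) := by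
  unfold pvAStep
  rw [hnh, if_neg (by decide : ¬ (false = true))]

-- A's loop body on a non-header line with a nonempty current dict is B's field step
theorem pv_stepA_nonheader (recs : List (PySem.Dict String String))
    (cur : PySem.Dict String String) (raw : String)
    (hne : cur.items.isEmpty = false)
    (hnh : PySem.Str.startswith (PySem.Str.rstrip raw) "### " = false) :
    pvAStep (recs, some cur) raw = (recs, some (pvBField cur (PySem.Str.rstrip raw))) := by
  rw [pvAStep_some recs cur raw hnh]
  unfold pvBField
  rw [hne, if_neg (by decide : ¬ (false = true))]
  rw [pv_colon_lstrip_str (PySem.Str.rstrip raw)]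
  cases h1 : PySem.Str.startswith (PySem.Str.lstrip (PySem.Str.rstrip raw)) "- " with
  | false =>
    rw [if_pos rfl, Bool.false_and, if_neg (by decide : ¬ (false = true))]
  | true =>
    rw [if_neg (by decide : ¬ (true = false)), Bool.true_and]
    cases h2 : PySem.Str.isIn ":" (PySem.Str.rstrip raw) with
    | false =>
      rw [if_pos rfl, if_neg (by decide : ¬ (false = true))]
    | true =>
      rw [if_neg (by decide : ¬ (true = false)), if_pos rfl]
      cases hs : PySem.Str.splitMax?
          (PySem.Str.slice (PySem.Str.lstrip (PySem.Str.rstrip raw)) (some 2) none) ":" 1 with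
      | none => rfl
      | some parts =>
        match parts with
        | [] => rfl
        | [k] => rfl
        | [k, v] => rw [show pvANorm = pvBNorm from rfl]
        | k :: v :: w :: r => rfl

-- computation lemmas for pvBBlocks
theorem pvBBlocks_nil : pvBBlocks [] = [] := by
  unfold pvBBlocks
  rfl
theorem pvBBlocks_cons_true (first : String) (rest : List String)
    (h : pvBHeader first = true) :
    pvBBlocks (first :: rest) =
      (PySem.Str.strip (PySem.Str.slice first (some 4) none),
       rest.takeWhile (fun l => !pvBHeader l))
        :: pvBBlocks (rest.dropWhile (fun l => !pvBHeader l)) := by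
  conv_lhs => unfold pvBBlocks
  rw [h, if_pos rfl]
theorem pvBBlocks_cons_false (first : String) (rest : List String)
    (h : pvBHeader first = false) :
    pvBBlocks (first :: rest) = pvBBlocks rest := by
  conv_lhs => unfold pvBBlocks
  rw [h, if_neg (by decide : ¬ (false = true))]

-- the invariant while a block is open: A finishes the current block with B's field folds,
-- then proceeds as B does on the remaining blocks
theorem pv_loop_some (raws : List String) (recs : List (PySem.Dict String String))
    (cur : PySem.Dict String String) (hne : cur.items.isEmpty = false) :
    pvAFlush (raws.foldl pvAStep (recs, some cur)).1 (raws.foldl pvAStep (recs, some cur)).2 =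
      recs
        ++ [((raws.map PySem.Str.rstrip).takeWhile (fun l => !pvBHeader l)).foldl pvBField cur]
        ++ (pvBBlocks ((raws.map PySem.Str.rstrip).dropWhile (fun l => !pvBHeader l))).map
            (fun b => pvBRecord b.1 b.2) := by
  induction raws generalizing recs cur with
  | nil =>
    show pvAFlush recs (some cur) = _
    rw [pvAFlush_some recs cur hne, List.map_nil, List.takeWhile_nil, List.dropWhile_nil,
      pvBBlocks_nil, List.foldl_nil, List.map_nil, List.append_nil]
  | cons raw rest ih =>
    cases hB : pvBHeader (PySem.Str.rstrip raw) with
    | true =>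
      rw [List.foldl_cons, pvAStep_header recs (some cur) raw hB,
        ih (pvAFlush recs (some cur))
          (PySem.Dict.insert PySem.Dict.empty "id"
            (PySem.Str.strip (PySem.Str.slice (PySem.Str.rstrip raw) (some 4) none)))
          (pv_insert_nonempty _ _ _),
        List.map_cons, List.takeWhile_cons, List.dropWhile_cons, hB,
        Bool.not_true, pvAFlush_some recs cur hne]
      simp only [Bool.false_eq_true, if_false]
      rw [pvBBlocks_cons_true _ _ hB]
      simp only [List.map_cons, List.foldl_nil, pvBRecord]
      simp only [List.append_assoc, List.cons_append, List.nil_append]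
    | false =>
      rw [List.foldl_cons, pv_stepA_nonheader recs cur raw hne hB,
        ih recs (pvBField cur (PySem.Str.rstrip raw)) (pv_field_nonempty cur _ hne),
        List.map_cons, List.takeWhile_cons, List.dropWhile_cons, hB,
        Bool.not_false]
      simp only [if_true, List.foldl_cons]

-- before the first header A keeps skipping lines, exactly as B discards them
theorem pv_loop_none (raws : List String) (recs : List (PySem.Dict String String)) :
    pvAFlush (raws.foldl pvAStep (recs, none)).1 (raws.foldl pvAStep (recs, none)).2 =
      recs ++ (pvBBlocks (raws.map PySem.Str.rstrip)).map (fun b => pvBRecord b.1 b.2) := by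
  induction raws generalizing recs with
  | nil =>
    show pvAFlush recs none = _
    rw [List.map_nil, pvBBlocks_nil, List.map_nil, List.append_nil]
    rfl
  | cons raw rest ih =>
    cases hB : pvBHeader (PySem.Str.rstrip raw) with
    | true =>
      rw [List.foldl_cons, pvAStep_header recs none raw hB,
        pv_loop_some rest (pvAFlush recs none)
          (PySem.Dict.insert PySem.Dict.empty "id"
            (PySem.Str.strip (PySem.Str.slice (PySem.Str.rstrip raw) (some 4) none)))
          (pv_insert_nonempty _ _ _),
        List.map_cons, pvBBlocks_cons_true _ _ hB]
      show recs ++ [_] ++ _ = _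
      simp only [List.map_cons, pvBRecord]
      simp only [List.append_assoc, List.cons_append, List.nil_append]
    | false =>
      rw [List.foldl_cons, pvAStep_none recs raw hB, ih recs,
        List.map_cons, pvBBlocks_cons_false _ _ hB]

-- ===== VERDICT (by name: the statement is the Claim_ definition above) =====
theorem parse_item_blocks_spec : Claim_equal_parse_item_blocks := by
  intro text _
  unfold Spec_parse_item_blocks parse_item_blocks parse_item_blocks_alt
  show (pvAFlush ((PySem.Str.splitlines (if text = "" then "" else text)).foldl pvAStep
        ([], none)).1 ((PySem.Str.splitlines (if text = "" then "" else text)).foldl pvAStep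
        ([], none)).2).map PySem.Dict.items = _
  rw [pv_loop_none (PySem.Str.splitlines (if text = "" then "" else text)) []]
  simp
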